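-- pv_equiv track=rewrite | github.com/TingC12/chicken | before google/Chick/app/services/level.py | calc_level_from_exp
-- ===== SOURCE A (Python) =====
-- LEVEL_CONFIG = [
--     (1, 10, 100),   # 1~10 級，每級 100 exp
--     (11, 20, 200),  # 11~20 級，每級 200 exp
--     (21, 30, 300),  # 21~30 級，每級 300 exp
--     (31, 40, 500),  # 31~40 級，每級 500 exp
--     (41, 50, 1000), # 41~50 級，每級 1000 exp
-- ]
--
-- MAX_LEVEL = 50
--
-- def get_required_exp_for_level(level: int) -> int:
--     """回傳『從目前等級升到下一級』所需要的 EXP。"""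
--     if level >= MAX_LEVEL:
--         return 0
--     for start, end, need in LEVEL_CONFIG:
--         if start <= level <= end:
--             return need
--     # 理論上不會跑到這裡，保底用
--     return LEVEL_CONFIG[-1][2]
--
-- def calc_level_from_exp(total_exp: int) -> int:
--     """依照『總 EXP』算出等級。"""
--     total_exp = max(0, total_exp or 0)
--     level = 1
--
--     while level < MAX_LEVEL:
--         need = get_required_exp_for_level(level)
--         if total_exp >= need:
--             total_exp -= need
--             level += 1
--         else:
--             break
--     return level
-- ===== SOURCE B (Python) =====
-- # Table-based reimplementation: precompute cumulative EXP thresholds once,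
-- # then the level is 1 + (number of thresholds <= clamped total EXP).
-- LEVEL_CONFIG = [
--     (1, 10, 100),
--     (11, 20, 200),
--     (21, 30, 300),
--     (31, 40, 500),
--     (41, 50, 1000),
-- ]
--
-- MAX_LEVEL = 50
--
-- _NEEDS = [need
--           for start, end, need in LEVEL_CONFIG
--           for _ in range(start, min(end, MAX_LEVEL - 1) + 1)]
--
-- _THRESHOLDS = []
-- _acc = 0
-- for _n in _NEEDS:
--     _acc += _n
--     _THRESHOLDS.append(_acc)
--
--
-- def calc_level_from_exp(total_exp: int) -> int:
--     e = max(0, total_exp or 0)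
--     return 1 + sum(1 for t in _THRESHOLDS if t <= e)
-- ===== Notes on version B (the rewrite author's own statement) =====
-- stated objective: alternative
-- what changed: Replaces the decrement-and-break while loop (repeated subtraction of each level's cost) with a precomputed cumulative-threshold table plus a count of thresholds <= the clamped total EXP.
import Mathlib
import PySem

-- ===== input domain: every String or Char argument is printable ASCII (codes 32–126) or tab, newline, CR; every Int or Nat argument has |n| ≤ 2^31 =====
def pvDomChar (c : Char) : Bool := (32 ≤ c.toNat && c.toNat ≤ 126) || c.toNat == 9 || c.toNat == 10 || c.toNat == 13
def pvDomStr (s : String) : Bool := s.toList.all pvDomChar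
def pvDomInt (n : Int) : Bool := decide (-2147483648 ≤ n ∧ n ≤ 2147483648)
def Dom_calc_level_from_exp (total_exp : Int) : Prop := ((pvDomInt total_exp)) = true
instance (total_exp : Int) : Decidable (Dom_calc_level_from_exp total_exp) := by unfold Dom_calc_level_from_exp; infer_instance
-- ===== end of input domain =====

-- B replaces A's decrement-and-break while loop by a precomputed cumulative-threshold
-- table and counts thresholds ≤ the clamped total EXP (objective: alternative).

-- ===== PORT A =====
def pvLEVEL_CONFIG : List (Int × Int × Int) :=
  [(1, 10, 100), (11, 20, 200), (21, 30, 300), (31, 40, 500), (41, 50, 1000)]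

def pvMAX_LEVEL : Int := 50

def get_required_exp_for_level (level : Int) : Int :=
  if level ≥ pvMAX_LEVEL then 0
  else
    match pvLEVEL_CONFIG.find? (fun c => decide (c.1 ≤ level) && decide (level ≤ c.2.1)) with
    | some c => c.2.2
    | none => (pvLEVEL_CONFIG.getLastD (0, 0, 0)).2.2   -- LEVEL_CONFIG[-1][2]

-- the while loop; fuel 49 = MAX_LEVEL - initial level, enough since level increments each pass
def pvLoopA (exp level : Int) : Nat → Int
  | 0 => level
  | f + 1 =>
    if level < pvMAX_LEVEL then
      if exp ≥ get_required_exp_for_level level then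
        pvLoopA (exp - get_required_exp_for_level level) (level + 1) f
      else level
    else level

def calc_level_from_exp (total_exp : Int) : Int :=
  let t := max 0 (if total_exp = 0 then 0 else total_exp)  -- max(0, total_exp or 0)
  pvLoopA t 1 49

-- ===== PORT B =====
def pvNEEDS : List Int :=
  pvLEVEL_CONFIG.flatMap (fun c =>
    (PySem.List.pyRange c.1 (min c.2.1 (pvMAX_LEVEL - 1) + 1) 1).map (fun _ => c.2.2))

def pvTHRESHOLDS : List Int :=
  (pvNEEDS.foldl (fun (p : List Int × Int) n => (p.1 ++ [p.2 + n], p.2 + n)) ([], 0)).1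

def calc_level_from_exp_alt (total_exp : Int) : Int :=
  let e := max 0 (if total_exp = 0 then 0 else total_exp)
  1 + pvTHRESHOLDS.foldl (fun c t => if t ≤ e then c + 1 else c) 0

-- ===== PRECONDITION & SPEC =====
def Spec_calc_level_from_exp (total_exp : Int) (out : Int) : Prop := out = calc_level_from_exp_alt total_exp
instance (total_exp : Int) (out : Int) : Decidable (Spec_calc_level_from_exp total_exp out) := by unfold Spec_calc_level_from_exp; infer_instance

-- ===== CLAIM (what is proved, stated in full; the proofs are below) =====
def Claim_equal_calc_level_from_exp : Prop := ∀ (total_exp : Int), Dom_calc_level_from_exp total_exp → Spec_calc_level_from_exp total_exp (calc_level_from_exp total_exp)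

-- ===== LEMMAS AND PROOFS =====

-- A's loop, abstracted over the list of per-level needs
def pvLoopC (e : Int) : List Int → Int
  | [] => 0
  | n :: ns => if e ≥ n then 1 + pvLoopC (e - n) ns else 0

def pvNeedsOf (level : Int) : Nat → List Int
  | 0 => []
  | f + 1 => get_required_exp_for_level level :: pvNeedsOf (level + 1) f

def pvCumsums (a : Int) : List Int → List Int
  | [] => []
  | n :: ns => (a + n) :: pvCumsums (a + n) ns

def pvCountLE (e : Int) : List Int → Int
  | [] => 0
  | x :: l => (if x ≤ e then 1 else 0) + pvCountLE e l

lemma loopA_eq (fuel : Nat) : ∀ (level e : Int), level + fuel ≤ 50 →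
    pvLoopA e level fuel = level + pvLoopC e (pvNeedsOf level fuel) := by
  induction fuel with
  | zero => intro level e _; simp [pvLoopA, pvNeedsOf, pvLoopC]
  | succ f ih =>
    intro level e h
    have hl : level < pvMAX_LEVEL := by unfold pvMAX_LEVEL; omega
    simp only [pvLoopA, pvNeedsOf, pvLoopC, if_pos hl]
    by_cases hge : e ≥ get_required_exp_for_level level
    · rw [if_pos hge, if_pos hge, ih (level + 1) _ (by omega)]
      ring
    · rw [if_neg hge, if_neg hge]; ring

lemma countLE_foldl (e : Int) : ∀ (l : List Int) (c : Int),
    l.foldl (fun c t => if t ≤ e then c + 1 else c) c = c + pvCountLE e l := by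
  intro l
  induction l with
  | nil => intro c; simp [pvCountLE]
  | cons x l ih =>
    intro c
    simp only [List.foldl, pvCountLE]
    by_cases h : x ≤ e
    · rw [if_pos h, if_pos h, ih]; ring
    · rw [if_neg h, if_neg h, ih]; ring

lemma cumsums_shift : ∀ (ns : List Int) (a : Int),
    pvCumsums a ns = (pvCumsums 0 ns).map (a + ·) := by
  intro ns
  induction ns with
  | nil => intro a; simp [pvCumsums]
  | cons n ns ih =>
    intro a
    simp only [pvCumsums, List.map, ih (a + n), ih (0 + n), List.map_map]
    refine List.cons_eq_cons.mpr ⟨by ring, ?_⟩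
    congr 1; funext x; simp only [Function.comp]; ring

lemma countLE_map_shift (e a : Int) : ∀ (l : List Int),
    pvCountLE e (l.map (a + ·)) = pvCountLE (e - a) l := by
  intro l
  induction l with
  | nil => simp [pvCountLE]
  | cons x l ih =>
    simp only [List.map, pvCountLE, ih]
    congr 1
    by_cases h : x ≤ e - a
    · rw [if_pos h, if_pos (by omega : a + x ≤ e)]
    · rw [if_neg h, if_neg (by omega : ¬ a + x ≤ e)]

lemma mem_cumsums_gt : ∀ (ns : List Int) (a : Int), (∀ m ∈ ns, 0 < m) →
    ∀ y ∈ pvCumsums a ns, a < y := by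
  intro ns
  induction ns with
  | nil => intro a _ y hy; simp [pvCumsums] at hy
  | cons n ns ih =>
    intro a hpos y hy
    simp only [pvCumsums, List.mem_cons] at hy
    have hn : 0 < n := hpos n (by simp)
    rcases hy with rfl | hy
    · omega
    · have := ih (a + n) (fun m hm => hpos m (by simp [hm])) y hy
      omega

lemma countLE_zero (e : Int) : ∀ (l : List Int), (∀ y ∈ l, e < y) → pvCountLE e l = 0 := by
  intro l
  induction l with
  | nil => intro _; simp [pvCountLE]
  | cons x l ih =>
    intro h
    simp only [pvCountLE]
    rw [if_neg (by have := h x (by simp); omega), ih (fun y hy => h y (by simp [hy]))]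
    norm_num

lemma loopC_count : ∀ (ns : List Int), (∀ m ∈ ns, 0 < m) →
    ∀ e : Int, pvLoopC e ns = pvCountLE e (pvCumsums 0 ns) := by
  intro ns
  induction ns with
  | nil => intro _ e; simp [pvLoopC, pvCumsums, pvCountLE]
  | cons n ns ih =>
    intro hpos e
    have hns : ∀ m ∈ ns, 0 < m := fun m hm => hpos m (by simp [hm])
    simp only [pvLoopC, pvCumsums, pvCountLE, Int.zero_add]
    by_cases h : e ≥ n
    · rw [if_pos h, if_pos (by omega : n ≤ e), ih hns,
        cumsums_shift ns n, countLE_map_shift]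
    · rw [if_neg h, if_neg (by omega : ¬ n ≤ e),
        countLE_zero e (pvCumsums n ns)
          (fun y hy => by have := mem_cumsums_gt ns n hns y hy; omega)]
      ring

lemma thresholds_eq : pvTHRESHOLDS = pvCumsums 0 (pvNeedsOf 1 49) := by decide

lemma needs_pos : ∀ m ∈ pvNeedsOf 1 49, 0 < m := by decide

-- ===== VERDICT (by name: the statement is the Claim_ definition above) =====
theorem calc_level_from_exp_spec : Claim_equal_calc_level_from_exp := by
  intro total_exp _
  unfold Spec_calc_level_from_exp calc_level_from_exp calc_level_from_exp_alt
  rw [loopA_eq 49 1 _ (by norm_num), loopC_count _ needs_pos, ← thresholds_eq]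
  show 1 + pvCountLE (max 0 (if total_exp = 0 then 0 else total_exp)) pvTHRESHOLDS =
    1 + List.foldl
      (fun c t => if t ≤ max 0 (if total_exp = 0 then 0 else total_exp) then c + 1 else c)
      0 pvTHRESHOLDS
  rw [countLE_foldl]
  ring
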